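-- pv_equiv track=rewrite | github.com/Debabrata7719/DataCrew_AI | src/memory/manager.py | _get_important_messages
-- ===== SOURCE A (Python) =====
-- from typing import List, Dict
--
-- def _get_important_messages(messages: List[Dict]) -> List[Dict]:
--     important = []
--     keywords = ["email", "send", "create", "document", "attach", "report", "?"]
--
--     for msg in messages:
--         content_lower = msg["content"].lower()
--         if any(keyword in content_lower for keyword in keywords):
--             important.append(msg)
--
--     return important[-10:]
-- ===== SOURCE B (Python) =====
-- from typing import List, Dict
--
-- def _get_important_messages(messages: List[Dict]) -> List[Dict]:
--     keywords = ["email", "send", "create", "document", "attach", "report", "?"]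
--     buf = []
--     for msg in reversed(messages):
--         content_lower = msg["content"].lower()
--         if any(keyword in content_lower for keyword in keywords):
--             buf.append(msg)
--             if len(buf) == 10:
--                 break
--     buf.reverse()
--     return buf
-- ===== Notes on version B (the rewrite author's own statement) =====
-- stated objective: alternative
-- what changed: B walks the messages back-to-front, collecting at most 10 matches and stopping early, then reverses the buffer, instead of filtering the whole list and slicing the last 10.
import Mathlib
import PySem

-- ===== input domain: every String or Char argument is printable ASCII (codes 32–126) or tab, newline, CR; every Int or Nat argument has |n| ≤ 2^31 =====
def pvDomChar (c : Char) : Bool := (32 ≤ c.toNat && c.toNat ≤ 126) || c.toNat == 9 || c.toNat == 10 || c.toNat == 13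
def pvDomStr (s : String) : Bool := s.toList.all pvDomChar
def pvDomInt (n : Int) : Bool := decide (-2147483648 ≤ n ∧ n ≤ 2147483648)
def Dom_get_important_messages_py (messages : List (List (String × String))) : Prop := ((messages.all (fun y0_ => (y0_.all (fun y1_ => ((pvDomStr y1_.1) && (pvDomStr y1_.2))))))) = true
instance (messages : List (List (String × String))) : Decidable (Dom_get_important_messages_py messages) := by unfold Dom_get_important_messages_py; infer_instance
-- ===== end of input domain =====

-- B collects the last 10 matches directly by a back-to-front traversal with early exit,
-- instead of filtering the whole list and slicing; equal return value proved on Pre_.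

-- shared keyword test: any(keyword in msg["content"].lower() for keyword in keywords)
-- (msg["content"] is first-match assoc lookup; total only under Pre_, default never used there)
def pvImportant (msg : List (String × String)) : Bool :=
  let contentLower := PySem.Str.lower ((List.lookup "content" msg).getD "")
  (["email", "send", "create", "document", "attach", "report", "?"]).any
    (fun keyword => PySem.Str.isIn keyword contentLower)

-- ===== PORT A =====
def get_important_messages_py (messages : List (List (String × String))) : List (List (String × String)) :=
  let important := messages.foldl
    (fun important msg => if pvImportant msg then important ++ [msg] else important) []
  PySem.List.slice important (some (-10)) none

-- ===== PORT B =====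
-- the reversed-iteration loop: collect matches, break once the buffer holds 10
def pvAltGo (xs : List (List (String × String))) (n : Nat) : List (List (String × String)) :=
  match xs with
  | [] => []
  | msg :: rest =>
    if pvImportant msg then
      (if n + 1 = 10 then [msg] else msg :: pvAltGo rest (n + 1))
    else pvAltGo rest n

def get_important_messages_py_alt (messages : List (List (String × String))) : List (List (String × String)) :=
  (pvAltGo messages.reverse 0).reverse

-- ===== PRECONDITION & SPEC =====
-- Pre_ excludes exactly the messages lacking a "content" key, on which Python A raises KeyError.
def Pre_get_important_messages_py (messages : List (List (String × String))) : Prop :=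
  messages.all (fun msg => (List.lookup "content" msg).isSome) = true
instance (messages : List (List (String × String))) : Decidable (Pre_get_important_messages_py messages) := by unfold Pre_get_important_messages_py; infer_instance

def pvWitness_get_important_messages_py : (List (List (String × String))) :=
  [[("content", "please send the report")], [("content", "hello")]]

def Spec_get_important_messages_py (messages : List (List (String × String))) (out : List (List (String × String))) : Prop := out = get_important_messages_py_alt messages
instance (messages : List (List (String × String))) (out : List (List (String × String))) : Decidable (Spec_get_important_messages_py messages out) := by unfold Spec_get_important_messages_py; infer_instance

-- ===== CLAIM (what is proved, stated in full; the proofs are below) =====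
def Claim_equal_get_important_messages_py : Prop := ∀ (messages : List (List (String × String))), Dom_get_important_messages_py messages → Pre_get_important_messages_py messages → Spec_get_important_messages_py messages (get_important_messages_py messages)

-- ===== LEMMAS AND PROOFS =====

-- A's append-loop is a filter
lemma pvA_filter (messages : List (List (String × String))) :
    messages.foldl (fun important msg => if pvImportant msg then important ++ [msg] else important) [] =
      messages.filter pvImportant := by
  simpa using PySem.List.foldl_append_if_eq_filter (l := messages) (p := pvImportant) (acc := [])

-- B's loop takes the first 10 - n matches
lemma pvAltGo_eq_take (xs : List (List (String × String))) (n : Nat) (hn : n < 10) :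
    pvAltGo xs n = (xs.filter pvImportant).take (10 - n) := by
  induction xs generalizing n with
  | nil => simp [pvAltGo]
  | cons m rest ih =>
    by_cases hm : pvImportant m
    · by_cases h10 : n + 1 = 10
      · have : 10 - n = 1 := by omega
        simp [pvAltGo, hm, h10, this]
      · have h1 : n + 1 < 10 := by omega
        have : 10 - n = (10 - (n + 1)) + 1 := by omega
        simp [pvAltGo, hm, h10, this, ih (n + 1) h1]
    · simp [pvAltGo, hm, ih n hn]

lemma pv_rev_take_drop {α : Type} (xs : List α) (k : Nat) :
    (xs.reverse.take k).reverse = xs.drop (xs.length - k) := by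
  rcases le_or_gt k xs.length with h | h
  · rw [List.take_reverse, List.reverse_reverse]
  · rw [List.take_of_length_le (by simpa using h.le), List.reverse_reverse]
    simp [Nat.sub_eq_zero_of_le h.le]

-- ===== VERDICT (by name: the statement is the Claim_ definition above) =====
theorem get_important_messages_py_spec : Claim_equal_get_important_messages_py := by
  intro messages _ _
  show _ = _
  unfold get_important_messages_py get_important_messages_py_alt
  rw [pvA_filter, pvAltGo_eq_take messages.reverse 0 (by omega),
    PySem.List.slice_from_neg_ofNat _ 10 (by omega), List.filter_reverse,
    pv_rev_take_drop]
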